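-- pv_equiv track=rewrite | github.com/rodionov-alex/InformaticsPython | _2022/#27/Reshu/2/r27_v2.py | find_min_sum
-- ===== SOURCE A (Python) =====
-- def find_min_sum(nums_list: list):
--     nums_list.sort()
--     cnt = len(nums_list)
--     res = []
--
--     for i in range(cnt - 2):
--         for j in range(i + 1, cnt - 1):
--             for k in range(j + 1, cnt):
--                 sm = nums_list[i] + nums_list[k] + nums_list[j]
--
--                 if sm % 3 == 0:
--                     return sm
--     return 0
-- ===== SOURCE B (Python) =====
-- def find_min_sum(nums_list: list):
--     nums_list.sort()
--     s = nums_list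
--     n = len(s)
--     # nxt[p] = (a, b, c): smallest index k >= p with s[k] % 3 == 0 / 1 / 2, or n if none;
--     # built back-to-front in one linear pass
--     rows = [(n, n, n)]
--     for p in range(n - 1, -1, -1):
--         a, b, c = rows[-1]
--         t = s[p] % 3
--         if t == 0:
--             a = p
--         elif t == 1:
--             b = p
--         else:
--             c = p
--         rows.append((a, b, c))
--     rows.reverse()
--     nxt = rows
--     for i in range(n - 2):
--         si = s[i]
--         for j in range(i + 1, n - 1):
--             t = (-si - s[j]) % 3
--             k = nxt[j + 1][t]
--             if k < n:
--                 return si + s[j] + s[k]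
--     return 0
-- ===== Notes on version B (the rewrite author's own statement) =====
-- stated objective: alternative
-- what changed: B replaces A's innermost scan for a third element by a precomputed next-index-by-residue-mod-3 table over the sorted list, so each (i,j) pair is resolved by one table lookup instead of a scan; worst case drops from cubic to quadratic, but on typical inputs A already returns at the first pair so no measured speed-up is claimed.
import Mathlib
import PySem

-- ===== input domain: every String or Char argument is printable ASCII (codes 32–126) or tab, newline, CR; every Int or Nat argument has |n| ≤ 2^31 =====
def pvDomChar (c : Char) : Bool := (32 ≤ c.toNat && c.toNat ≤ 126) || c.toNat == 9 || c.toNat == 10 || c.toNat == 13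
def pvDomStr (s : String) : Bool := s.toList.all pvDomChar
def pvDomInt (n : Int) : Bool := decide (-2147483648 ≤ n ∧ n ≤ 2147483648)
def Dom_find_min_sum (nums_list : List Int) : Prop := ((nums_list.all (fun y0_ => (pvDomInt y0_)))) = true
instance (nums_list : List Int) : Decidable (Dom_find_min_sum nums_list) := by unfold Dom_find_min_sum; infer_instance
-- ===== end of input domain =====

-- B replaces A's innermost k-scan by one lookup in a precomputed next-index-by-residue table.
-- Both A and B sort the caller's list in place; the equivalence proved here is about the return value.

-- ===== PORT A =====
-- innermost loop: for k in range(j+1, cnt): sm = s[i]+s[k]+s[j]; if sm % 3 == 0: return sm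
def pvAK (s : List Int) (i j : Int) : List Int → Option Int
  | [] => none
  | k :: ks =>
      let sm := PySem.List.pyGetD s i 0 + PySem.List.pyGetD s k 0 + PySem.List.pyGetD s j 0
      if PySem.Int.mod sm 3 = 0 then some sm else pvAK s i j ks

-- middle loop: for j in range(i+1, cnt-1)
def pvAJ (s : List Int) (cnt i : Int) : List Int → Option Int
  | [] => none
  | j :: js =>
      match pvAK s i j (PySem.List.pyRange (j + 1) cnt 1) with
      | some sm => some sm
      | none => pvAJ s cnt i js

-- outer loop: for i in range(cnt-2)
def pvAI (s : List Int) (cnt : Int) : List Int → Option Int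
  | [] => none
  | i :: is_ =>
      match pvAJ s cnt i (PySem.List.pyRange (i + 1) (cnt - 1) 1) with
      | some sm => some sm
      | none => pvAI s cnt is_

def find_min_sum (nums_list : List Int) : Int :=
  let s := PySem.List.sorted nums_list (fun x => x) false  -- nums_list.sort()
  let cnt : Int := s.length
  -- (A's 'res = []' is dead code)
  match pvAI s cnt (PySem.List.pyRange 0 (cnt - 2) 1) with
  | some sm => sm
  | none => 0

-- ===== PORT B =====
-- nxt[p] = (a,b,c): smallest index k ≥ p with s[k] % 3 = 0 / 1 / 2, or n; built back-to-front
def pvBNxt (n : Int) (p : Int) : List Int → List (Int × Int × Int)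
  | [] => [(n, n, n)]
  | x :: rest =>
      let tail := pvBNxt n (p + 1) rest
      let row := tail.headD (n, n, n)
      let t := PySem.Int.mod x 3
      (if t = 0 then (p, row.2.1, row.2.2)
       else if t = 1 then (row.1, p, row.2.2)
       else (row.1, row.2.1, p)) :: tail

def pvBLookup (row : Int × Int × Int) (t : Int) : Int :=
  if t = 0 then row.1 else if t = 1 then row.2.1 else row.2.2

-- inner loop of B: for j in range(i+1, n-1): look up smallest k > j with the needed residue
def pvBJ (s : List Int) (nxt : List (Int × Int × Int)) (n si : Int) : List Int → Option Int
  | [] => none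
  | j :: js =>
      let sj := PySem.List.pyGetD s j 0
      let t := PySem.Int.mod (-si - sj) 3
      let k := pvBLookup (nxt.getD (j + 1).toNat (n, n, n)) t
      if k < n then some (si + sj + PySem.List.pyGetD s k 0) else pvBJ s nxt n si js

-- outer loop of B: for i in range(n-2)
def pvBI (s : List Int) (nxt : List (Int × Int × Int)) (n : Int) : List Int → Option Int
  | [] => none
  | i :: is_ =>
      match pvBJ s nxt n (PySem.List.pyGetD s i 0) (PySem.List.pyRange (i + 1) (n - 1) 1) with
      | some v => some v
      | none => pvBI s nxt n is_

def find_min_sum_alt (nums_list : List Int) : Int :=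
  let s := PySem.List.sorted nums_list (fun x => x) false  -- nums_list.sort()
  let n : Int := s.length
  let nxt := pvBNxt n 0 s
  match pvBI s nxt n (PySem.List.pyRange 0 (n - 2) 1) with
  | some v => v
  | none => 0

-- ===== PRECONDITION & SPEC =====
def Spec_find_min_sum (nums_list : List Int) (out : Int) : Prop := out = find_min_sum_alt nums_list
instance (nums_list : List Int) (out : Int) : Decidable (Spec_find_min_sum nums_list out) := by unfold Spec_find_min_sum; infer_instance

-- ===== CLAIM (what is proved, stated in full; the proofs are below) =====
def Claim_equal_find_min_sum : Prop := ∀ (nums_list : List Int), Dom_find_min_sum nums_list → Spec_find_min_sum nums_list (find_min_sum nums_list)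

-- ===== LEMMAS AND PROOFS =====

-- proof-side characterisation: first index k ≥ p (within the suffix) with s[k] % 3 = t, else n
def pvFirstK (n p t : Int) : List Int → Int
  | [] => n
  | x :: rest => if PySem.Int.mod x 3 = t then p else pvFirstK n (p + 1) t rest

theorem pvBNxt_head (n : Int) : ∀ (suffix : List Int) (p : Int),
    (pvBNxt n p suffix).headD (n, n, n)
      = (pvFirstK n p 0 suffix, pvFirstK n p 1 suffix, pvFirstK n p 2 suffix) := by
  intro suffix
  induction suffix with
  | nil => intro p; simp [pvBNxt, pvFirstK]
  | cons x rest ih =>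
      intro p
      have h0 : 0 ≤ PySem.Int.mod x 3 := PySem.Int.mod_nonneg x (by omega)
      have h3 : PySem.Int.mod x 3 < 3 := PySem.Int.mod_lt x (by omega)
      simp only [pvBNxt, pvFirstK, ih (p + 1), List.headD_cons]
      rcases (by omega : PySem.Int.mod x 3 = 0 ∨ PySem.Int.mod x 3 = 1 ∨ PySem.Int.mod x 3 = 2) with h | h | h <;>
        rw [h] <;> norm_num

theorem pvBNxt_getD (n : Int) : ∀ (suffix : List Int) (p : Int) (d : Nat), d ≤ suffix.length →
    (pvBNxt n p suffix).getD d (n, n, n)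
      = (pvBNxt n (p + (d : Int)) (suffix.drop d)).headD (n, n, n) := by
  intro suffix
  induction suffix with
  | nil =>
      intro p d hd
      have hd0 : d = 0 := by simpa using hd
      subst hd0
      simp [pvBNxt]
  | cons x rest ih =>
      intro p d hd
      cases d with
      | zero => simp [pvBNxt]
      | succ d' =>
          have := ih (p + 1) d' (by simpa using hd)
          simp only [pvBNxt, List.getD_cons_succ, List.drop_succ_cons, this]
          congr 2
          push_cast
          ring

-- residue arithmetic: s[i]+s[k]+s[j] ≡ 0 (mod 3) iff s[k] % 3 equals (-s[i]-s[j]) % 3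
theorem pvResidue (si sj x : Int) :
    (PySem.Int.mod (si + x + sj) 3 = 0) ↔ (PySem.Int.mod x 3 = PySem.Int.mod (-si - sj) 3) := by
  simp only [PySem.Int.mod_eq_emod_of_pos (show (0:Int) < 3 by omega)]
  omega

-- A's k-scan from position p equals the first suitable index in the suffix, summed
theorem pvK_eq (s : List Int) (i j : Int) (n : Int) (hn : n = (s.length : Int)) :
    ∀ (m : Nat) (p : Int), 0 ≤ p → m = (n - p).toNat →
    pvAK s i j (PySem.List.pyRange p n 1)
      = (if pvFirstK n p (PySem.Int.mod (-(PySem.List.pyGetD s i 0) - PySem.List.pyGetD s j 0) 3) (s.drop p.toNat) < n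
         then some (PySem.List.pyGetD s i 0 + PySem.List.pyGetD s j 0
              + PySem.List.pyGetD s (pvFirstK n p (PySem.Int.mod (-(PySem.List.pyGetD s i 0) - PySem.List.pyGetD s j 0) 3) (s.drop p.toNat)) 0)
         else none) := by
  intro m
  induction m with
  | zero =>
      intro p hp hm
      have hpn : n ≤ p := by omega
      have hdrop : s.drop p.toNat = [] := List.drop_eq_nil_of_le (by omega)
      rw [PySem.List.pyRange_one_eq_nil hpn]
      simp [pvAK, hdrop, pvFirstK]
  | succ m' ih =>
      intro p hp hm
      have hpn : p < n := by omega
      have hplen : p.toNat < s.length := by omega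
      rw [PySem.List.pyRange_one_cons hpn]
      have hdrop : s.drop p.toNat = s[p.toNat] :: s.drop (p.toNat + 1) :=
        List.drop_eq_getElem_cons hplen
      have hget : PySem.List.pyGetD s p 0 = s[p.toNat] :=
        PySem.List.pyGetD_eq_getElem s 0 hp (by omega)
      have hdropsucc : s.drop (p + 1).toNat = s.drop (p.toNat + 1) := by
        congr 1
        omega
      rw [hdrop]
      simp only [pvAK, pvFirstK]
      by_cases hc : PySem.Int.mod (PySem.List.pyGetD s i 0 + PySem.List.pyGetD s p 0 + PySem.List.pyGetD s j 0) 3 = 0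
      · have hres : PySem.Int.mod s[p.toNat] 3
            = PySem.Int.mod (-(PySem.List.pyGetD s i 0) - PySem.List.pyGetD s j 0) 3 := by
          rw [← hget]
          exact (pvResidue _ _ _).mp hc
        rw [if_pos hc, if_pos hres, if_pos hpn, hget]
        congr 1
        ring
      · have hres : ¬ (PySem.Int.mod s[p.toNat] 3
            = PySem.Int.mod (-(PySem.List.pyGetD s i 0) - PySem.List.pyGetD s j 0) 3) := by
          rw [← hget]
          intro h
          exact hc ((pvResidue _ _ _).mpr h)
        rw [if_neg hc, if_neg hres, ih (p + 1) (by omega) (by omega), hdropsucc]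

-- B's per-j table lookup equals pvFirstK from position j+1 (t a residue mod 3)
theorem pvLookup_eq (s : List Int) (n t j : Int) (_hn : n = (s.length : Int))
    (hj : 0 ≤ j) (hjn : j + 1 ≤ n) (ht0 : 0 ≤ t) (ht3 : t < 3) :
    pvBLookup ((pvBNxt n 0 s).getD (j + 1).toNat (n, n, n)) t
      = pvFirstK n (j + 1) t (s.drop (j + 1).toNat) := by
  rw [pvBNxt_getD n s 0 (j + 1).toNat (by omega), pvBNxt_head]
  have hcast : (0 : Int) + (((j + 1).toNat : Nat) : Int) = j + 1 := by omega
  rw [hcast]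
  rcases (by omega : t = 0 ∨ t = 1 ∨ t = 2) with h | h | h <;> subst h <;> simp [pvBLookup]

theorem pvJ_eq (s : List Int) (n i : Int) (hn : n = (s.length : Int)) :
    ∀ (js : List Int), (∀ j ∈ js, 0 ≤ j ∧ j + 1 ≤ n) →
    pvAJ s n i js = pvBJ s (pvBNxt n 0 s) n (PySem.List.pyGetD s i 0) js := by
  intro js
  induction js with
  | nil => intro _; rfl
  | cons j js ih =>
      intro hb
      obtain ⟨hj0, hj1⟩ := hb j (by simp)
      simp only [pvAJ, pvBJ]
      rw [pvK_eq s i j n hn (n - (j + 1)).toNat (j + 1) (by omega) rfl,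
          pvLookup_eq s n _ j hn hj0 hj1 (PySem.Int.mod_nonneg _ (by omega)) (PySem.Int.mod_lt _ (by omega))]
      by_cases hkn : pvFirstK n (j + 1)
          (PySem.Int.mod (-(PySem.List.pyGetD s i 0) - PySem.List.pyGetD s j 0) 3)
          (s.drop (j + 1).toNat) < n
      · rw [if_pos hkn, if_pos hkn]
      · rw [if_neg hkn, if_neg hkn]
        exact ih (fun x hx => hb x (by simp [hx]))

theorem pvI_eq (s : List Int) (n : Int) (hn : n = (s.length : Int)) :
    ∀ (is_ : List Int), (∀ i ∈ is_, 0 ≤ i) →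
    pvAI s n is_ = pvBI s (pvBNxt n 0 s) n is_ := by
  intro is_
  induction is_ with
  | nil => intro _; rfl
  | cons i is_ ih =>
      intro hb
      simp only [pvAI, pvBI]
      rw [pvJ_eq s n i hn (PySem.List.pyRange (i + 1) (n - 1) 1)
          (fun j hj => by
            rw [PySem.List.mem_pyRange_one] at hj
            have hi0 := hb i (by simp)
            constructor <;> omega)]
      cases pvBJ s (pvBNxt n 0 s) n (PySem.List.pyGetD s i 0) (PySem.List.pyRange (i + 1) (n - 1) 1) with
      | none => exact ih (fun x hx => hb x (by simp [hx]))
      | some v => rfl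

-- ===== VERDICT (by name: the statement is the Claim_ definition above) =====
theorem find_min_sum_spec : Claim_equal_find_min_sum := by
  intro nums_list _
  unfold Spec_find_min_sum find_min_sum find_min_sum_alt
  dsimp only
  rw [pvI_eq (PySem.List.sorted nums_list (fun x => x) false)
      ((PySem.List.sorted nums_list (fun x => x) false).length : Int) rfl
      (PySem.List.pyRange 0 (((PySem.List.sorted nums_list (fun x => x) false).length : Int) - 2) 1)
      (fun i hi => by
        rw [PySem.List.mem_pyRange_one] at hi
        omega)]
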